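-- pv_equiv track=rewrite | github.com/Stayermax/BORP | No Classes Code.py | averageIfZero
-- ===== SOURCE A (Python) =====
-- def averageIfZero(budget, year, yearAverageBudgetDict):
--     if (budget == 0):
--         if (year in yearAverageBudgetDict.keys()):
--             return yearAverageBudgetDict[year]
--         else:
--             closest_year_plus = year
--             closest_year_minus = year
--             while ((closest_year_plus not in yearAverageBudgetDict.keys())
--                    and (closest_year_minus not in yearAverageBudgetDict.keys())):
--                 closest_year_plus += 1
--                 closest_year_minus -= 1
--             if (closest_year_plus in yearAverageBudgetDict.keys()):
--                 return yearAverageBudgetDict[closest_year_plus]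
--             else:
--                 return yearAverageBudgetDict[closest_year_minus]
--     else:
--         return budget
-- ===== SOURCE B (Python) =====
-- def averageIfZero(budget, year, yearAverageBudgetDict):
--     if budget != 0:
--         return budget
--     # one pass over the keys: pick the key nearest to year,
--     # preferring the higher key on a distance tie
--     best = None
--     for k in yearAverageBudgetDict.keys():
--         if best is None or (abs(k - year), k < year) < (abs(best - year), best < year):
--             best = k
--     return yearAverageBudgetDict[best]
-- ===== Notes on version B (the rewrite author's own statement) =====
-- stated objective: alternative
-- what changed: A expands a ring year+-1, year+-2, ... around the query year, testing dict membership at every step until it hits a key; B makes a single pass over the keys keeping the one minimizing (|k-year|, k<year), which is exactly A's nearest-key-prefer-higher rule.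
import Mathlib
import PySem

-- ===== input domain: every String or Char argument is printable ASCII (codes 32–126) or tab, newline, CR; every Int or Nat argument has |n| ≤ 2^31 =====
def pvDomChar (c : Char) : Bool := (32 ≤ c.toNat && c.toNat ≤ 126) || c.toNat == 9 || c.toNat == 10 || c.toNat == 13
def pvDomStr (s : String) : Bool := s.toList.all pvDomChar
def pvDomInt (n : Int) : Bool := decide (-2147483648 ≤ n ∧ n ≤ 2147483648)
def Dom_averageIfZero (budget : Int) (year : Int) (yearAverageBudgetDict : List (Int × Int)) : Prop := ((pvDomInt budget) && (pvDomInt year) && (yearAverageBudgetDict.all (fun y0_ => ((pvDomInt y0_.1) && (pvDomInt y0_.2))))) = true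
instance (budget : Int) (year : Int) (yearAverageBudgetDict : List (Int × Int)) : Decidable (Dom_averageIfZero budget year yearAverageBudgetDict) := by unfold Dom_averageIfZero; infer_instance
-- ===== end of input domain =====

-- B replaces A's unbounded expanding ring search around `year` by a single pass over the
-- keys keeping the nearest one (preferring the higher key on a tie); return values only.

-- ===== PORT A =====
-- minimal distance from `year` to a key; used ONLY to size the fuel of A's while-loop
-- (a totality device: under Pre_ the loop provably exits before the fuel runs out)
def pvDmin (year : Int) (ks : List Int) : Nat :=
  (PySem.List.min? (ks.map (fun k => (k - year).natAbs)) (fun x => x)).getD 0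

-- the while-loop of A: while (p not in keys) and (m not in keys): p += 1; m -= 1
def pvALoop (d : PySem.Dict Int Int) : Nat → Int → Int → Int
  | 0, _, _ => 0
  | n + 1, p, m =>
    if !d.contains p && !d.contains m then
      pvALoop d n (p + 1) (m - 1)
    else if d.contains p then (d.get? p).getD 0 else (d.get? m).getD 0

def averageIfZero (budget : Int) (year : Int) (yearAverageBudgetDict : List (Int × Int)) : Int :=
  let d := PySem.Dict.ofList yearAverageBudgetDict
  if budget = 0 then
    if d.contains year then (d.get? year).getD 0
    else pvALoop d (pvDmin year d.keys + 1) year year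
  else budget

-- ===== PORT B =====
-- (abs(k - year), k < year) < (abs(b - year), b < year), Python's lexicographic tuple order
def pvBetter (year k b : Int) : Bool :=
  (k - year).natAbs < (b - year).natAbs ||
  ((k - year).natAbs == (b - year).natAbs && (!(decide (k < year)) && decide (b < year)))

def averageIfZero_alt (budget : Int) (year : Int) (yearAverageBudgetDict : List (Int × Int)) : Int :=
  if budget ≠ 0 then budget
  else
    let d := PySem.Dict.ofList yearAverageBudgetDict
    let best := d.keys.foldl
      (fun (b : Option Int) k =>
        match b with
        | none => some k
        | some bk => if pvBetter year k bk then some k else some bk)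
      none
    match best with
    | some bk => (d.get? bk).getD 0
    | none => 0

-- ===== PRECONDITION & SPEC =====
-- When budget == 0 and the dict is empty, A's while-loop never terminates
-- (and B raises KeyError); Pre_ excludes exactly that case.
def Pre_averageIfZero (budget : Int) (year : Int) (yearAverageBudgetDict : List (Int × Int)) : Prop :=
  budget ≠ 0 ∨ yearAverageBudgetDict ≠ []
instance (budget : Int) (year : Int) (yearAverageBudgetDict : List (Int × Int)) : Decidable (Pre_averageIfZero budget year yearAverageBudgetDict) := by unfold Pre_averageIfZero; infer_instance

def pvWitness_averageIfZero : Int × Int × (List (Int × Int)) := (0, 5, [(3, 10), (8, 20)])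

def Spec_averageIfZero (budget : Int) (year : Int) (yearAverageBudgetDict : List (Int × Int)) (out : Int) : Prop := out = averageIfZero_alt budget year yearAverageBudgetDict
instance (budget : Int) (year : Int) (yearAverageBudgetDict : List (Int × Int)) (out : Int) : Decidable (Spec_averageIfZero budget year yearAverageBudgetDict out) := by unfold Spec_averageIfZero; infer_instance

-- ===== CLAIM (what is proved, stated in full; the proofs are below) =====
def Claim_equal_averageIfZero : Prop := ∀ (budget : Int) (year : Int) (yearAverageBudgetDict : List (Int × Int)), Dom_averageIfZero budget year yearAverageBudgetDict → Pre_averageIfZero budget year yearAverageBudgetDict → Spec_averageIfZero budget year yearAverageBudgetDict (averageIfZero budget year yearAverageBudgetDict)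

-- ===== LEMMAS AND PROOFS =====

-- scalarised lexicographic key: 2*|k-year| + (1 if k < year else 0)
def pvKey (year k : Int) : Nat :=
  2 * (k - year).natAbs + (if k < year then 1 else 0)

theorem pvBetter_iff (year k b : Int) :
    pvBetter year k b = true ↔ pvKey year k < pvKey year b := by
  simp only [pvBetter, pvKey, Bool.or_eq_true, Bool.and_eq_true, beq_iff_eq,
    decide_eq_true_eq, Bool.not_eq_true', decide_eq_false_iff_not]
  split_ifs <;> omega

theorem pvKey_inj (year k b : Int) (h : pvKey year k = pvKey year b) : k = b := by
  simp only [pvKey] at h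
  split_ifs at h <;> omega

-- the intended result: the key nearest to year, preferring year + dmin on a tie
def pvTarget (year : Int) (ks : List Int) : Int :=
  if (year + (pvDmin year ks : Int)) ∈ ks then year + (pvDmin year ks : Int)
  else year - (pvDmin year ks : Int)

theorem pvDmin_le (year : Int) (ks : List Int) (k : Int) (hk : k ∈ ks) :
    pvDmin year ks ≤ (k - year).natAbs := by
  unfold pvDmin
  rcases h : PySem.List.min? (ks.map (fun k => (k - year).natAbs)) (fun x => x) with _ | m
  · rw [PySem.List.min?_eq_none_iff] at h
    have : ks = [] := List.map_eq_nil_iff.mp h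
    rw [this] at hk
    exact absurd hk (List.not_mem_nil)
  · simpa using PySem.List.min?_isMin h ((k - year).natAbs) (List.mem_map_of_mem hk)

theorem pvDmin_achieved (year : Int) (ks : List Int) (hne : ks ≠ []) :
    ∃ k ∈ ks, (k - year).natAbs = pvDmin year ks := by
  unfold pvDmin
  rcases h : PySem.List.min? (ks.map (fun k => (k - year).natAbs)) (fun x => x) with _ | m
  · rw [PySem.List.min?_eq_none_iff] at h
    simp [List.map_eq_nil_iff] at h
    exact absurd h hne
  · have := PySem.List.min?_mem h
    rcases List.mem_map.1 this with ⟨k, hk, hkd⟩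
    exact ⟨k, hk, by simp [hkd]⟩

theorem pvTarget_mem (year : Int) (ks : List Int) (hne : ks ≠ []) :
    pvTarget year ks ∈ ks := by
  obtain ⟨k0, hk0, hd0⟩ := pvDmin_achieved year ks hne
  unfold pvTarget
  split_ifs with h
  · exact h
  · have : k0 = year + (pvDmin year ks : Int) ∨ k0 = year - (pvDmin year ks : Int) := by omega
    rcases this with h1 | h1
    · exact absurd (h1 ▸ hk0) h
    · exact h1 ▸ hk0

theorem pvKey_plus (year : Int) (d : Nat) : pvKey year (year + (d : Int)) = 2 * d := by
  unfold pvKey; split_ifs <;> omega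

theorem pvKey_minus_le (year : Int) (d : Nat) : pvKey year (year - (d : Int)) ≤ 2 * d + 1 := by
  unfold pvKey; split_ifs <;> omega

theorem pvKey_lb (year k : Int) : 2 * (k - year).natAbs ≤ pvKey year k := by
  unfold pvKey; split_ifs <;> omega

theorem pvTarget_isMin (year : Int) (ks : List Int) (k : Int) (hk : k ∈ ks) :
    pvKey year (pvTarget year ks) ≤ pvKey year k := by
  have hd := pvDmin_le year ks k hk
  have hlb := pvKey_lb year k
  unfold pvTarget
  split_ifs with h
  · -- target = year + dmin
    rw [pvKey_plus]
    omega
  · -- target = year - dmin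
    have hub := pvKey_minus_le year (pvDmin year ks)
    rcases Nat.lt_or_ge (pvDmin year ks) ((k - year).natAbs) with hlt | hge
    · omega
    · have heq : (k - year).natAbs = pvDmin year ks := by omega
      have : k = year + (pvDmin year ks : Int) ∨ k = year - (pvDmin year ks : Int) := by omega
      rcases this with rfl | rfl
      · exact absurd hk h
      · exact le_refl _

-- B's fold (with a `some` accumulator) equals a plain fold keeping the better key
def pvG (year : Int) (b k : Int) : Int := if pvBetter year k b then k else b

theorem pvFold_some (year : Int) (t : List Int) (a : Int) :
    t.foldl
      (fun (b : Option Int) k =>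
        match b with
        | none => some k
        | some bk => if pvBetter year k bk then some k else some bk)
      (some a) = some (t.foldl (pvG year) a) := by
  induction t generalizing a with
  | nil => rfl
  | cons k t ih =>
    simp only [List.foldl_cons]
    rw [show (if pvBetter year k a then some k else some a) = some (pvG year a k) by
      unfold pvG; split_ifs <;> rfl]
    exact ih _

theorem pvFold_mem (year : Int) (t : List Int) (a : Int) :
    t.foldl (pvG year) a = a ∨ t.foldl (pvG year) a ∈ t := by
  induction t generalizing a with
  | nil => simp
  | cons k t ih =>
    simp only [List.foldl_cons]
    rcases ih (pvG year a k) with h | h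
    · rw [h]; unfold pvG; split_ifs <;> simp
    · right; simp [h]

theorem pvFold_min (year : Int) (t : List Int) (a : Int) :
    pvKey year (t.foldl (pvG year) a) ≤ pvKey year a ∧
      ∀ k ∈ t, pvKey year (t.foldl (pvG year) a) ≤ pvKey year k := by
  induction t generalizing a with
  | nil => simp
  | cons k t ih =>
    simp only [List.foldl_cons]
    obtain ⟨h1, h2⟩ := ih (pvG year a k)
    have hga : pvKey year (pvG year a k) ≤ pvKey year a ∧
        pvKey year (pvG year a k) ≤ pvKey year k := by
      unfold pvG
      split_ifs with hb
      · have := (pvBetter_iff year k a).1 hb; omega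
      · have : ¬ pvKey year k < pvKey year a := fun hlt =>
          hb ((pvBetter_iff year k a).2 hlt)
        omega
    refine ⟨by omega, ?_⟩
    intro x hx
    rcases List.mem_cons.1 hx with rfl | hx
    · omega
    · exact h2 x hx

-- the fold result IS the target
theorem pvFold_eq_target (year : Int) (ks : List Int) (hne : ks ≠ []) :
    ks.foldl
      (fun (b : Option Int) k =>
        match b with
        | none => some k
        | some bk => if pvBetter year k bk then some k else some bk)
      none = some (pvTarget year ks) := by
  rcases ks with _ | ⟨h, t⟩
  · exact absurd rfl hne
  · simp only [List.foldl_cons]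
    rw [pvFold_some]
    congr 1
    set r := t.foldl (pvG year) h with hr
    have hmem : r ∈ h :: t := by
      rcases pvFold_mem year t h with h1 | h1
      · rw [hr, h1]; exact List.mem_cons_self
      · exact List.mem_cons_of_mem _ h1
    have hmin : ∀ k ∈ h :: t, pvKey year r ≤ pvKey year k := by
      intro k hk
      obtain ⟨h1, h2⟩ := pvFold_min year t h
      rcases List.mem_cons.1 hk with rfl | hk
      · exact h1
      · exact h2 k hk
    have ht_mem := pvTarget_mem year (h :: t) (by simp)
    have h1 := hmin _ ht_mem
    have h2 := pvTarget_isMin year (h :: t) r hmem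
    exact pvKey_inj year r (pvTarget year (h :: t)) (by omega)

-- A's loop reaches the target: at offset j (p = year + j, m = year - j) with fuel dmin - j + 1
theorem pvALoop_eq (d : PySem.Dict Int Int) (year : Int) (hne : d.keys ≠ []) :
    ∀ j, j ≤ pvDmin year d.keys →
      pvALoop d (pvDmin year d.keys - j + 1) (year + (j : Int)) (year - (j : Int)) =
        (d.get? (pvTarget year d.keys)).getD 0 := by
  intro j hj
  induction hn : pvDmin year d.keys - j generalizing j with
  | zero =>
    have hjd : j = pvDmin year d.keys := by omega
    subst hjd
    obtain ⟨k0, hk0, hd0⟩ := pvDmin_achieved year d.keys hne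
    have hk0' : k0 = year + (pvDmin year d.keys : Int) ∨
        k0 = year - (pvDmin year d.keys : Int) := by omega
    show pvALoop d 1 _ _ = _
    unfold pvALoop
    have hcond : ¬ (!d.contains (year + (pvDmin year d.keys : Int)) &&
        !d.contains (year - (pvDmin year d.keys : Int))) = true := by
      simp only [Bool.and_eq_true, Bool.not_eq_true']
      rintro ⟨hp, hm⟩
      rcases hk0' with rfl | rfl
      · exact absurd ((PySem.Dict.contains_iff_mem_keys d _).2 hk0) (by simp [hp])
      · exact absurd ((PySem.Dict.contains_iff_mem_keys d _).2 hk0) (by simp [hm])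
    rw [if_neg hcond]
    unfold pvTarget
    split_ifs with hp hc hc
    · rfl
    · exact absurd ((PySem.Dict.contains_iff_mem_keys d _).1 hp) hc
    · exact absurd ((PySem.Dict.contains_iff_mem_keys d _).2 hc) hp
    · rfl
  | succ n ih =>
    have hjlt : j < pvDmin year d.keys := by omega
    show pvALoop d (n + 1 + 1) _ _ = _
    unfold pvALoop
    have hnp : ∀ x : Int, (x - year).natAbs = j → ¬ d.contains x = true := by
      intro x hx hc
      have := pvDmin_le year d.keys x ((PySem.Dict.contains_iff_mem_keys d x).1 hc)
      omega
    have hp' : d.contains (year + (j : Int)) = false := by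
      cases hc : d.contains (year + (j : Int)) with
      | false => rfl
      | true => exact absurd hc (hnp _ (by omega))
    have hm' : d.contains (year - (j : Int)) = false := by
      cases hc : d.contains (year - (j : Int)) with
      | false => rfl
      | true => exact absurd hc (hnp _ (by omega))
    have hcond : (!d.contains (year + (j : Int)) && !d.contains (year - (j : Int))) = true := by
      simp [hp', hm']
    rw [if_pos hcond]
    have h1 : year + (j : Int) + 1 = year + ((j + 1 : Nat) : Int) := by push_cast; ring
    have h2 : year - (j : Int) - 1 = year - ((j + 1 : Nat) : Int) := by push_cast; ring
    rw [h1, h2]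
    exact ih (j + 1) (by omega) (by omega)

theorem pvKeys_ofList (l : List (Int × Int)) :
    (PySem.Dict.ofList l).keys = PySem.Set.ofList (l.map Prod.fst) := by
  simp [PySem.Dict.ofList, PySem.Dict.update, PySem.Dict.keys_foldl_insert_key,
    PySem.Set.ofList, PySem.Dict.keys_empty]
  rfl

theorem pvKeys_ne_nil (l : List (Int × Int)) (hne : l ≠ []) :
    (PySem.Dict.ofList l).keys ≠ [] := by
  rcases l with _ | ⟨p, t⟩
  · exact absurd rfl hne
  · intro h
    have : p.1 ∈ (PySem.Dict.ofList (p :: t)).keys := by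
      rw [pvKeys_ofList]
      exact (PySem.Set.mem_ofList _ _).2 (by simp)
    rw [h] at this
    exact absurd this (List.not_mem_nil)

-- ===== VERDICT (by name: the statement is the Claim_ definition above) =====
theorem averageIfZero_spec : Claim_equal_averageIfZero := by
  intro budget year l _ hpre
  unfold Spec_averageIfZero
  by_cases hb : budget = 0
  · subst hb
    have hl : l ≠ [] := by
      rcases hpre with h | h
      · exact absurd rfl h
      · exact h
    show averageIfZero 0 year l = averageIfZero_alt 0 year l
    unfold averageIfZero averageIfZero_alt
    simp only [ne_eq, not_true_eq_false, if_false, reduceIte]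
    set d := PySem.Dict.ofList l with hd
    have hk : d.keys ≠ [] := pvKeys_ne_nil l hl
    rw [pvFold_eq_target year d.keys hk]
    by_cases hc : d.contains year = true
    · rw [if_pos hc]
      have hy : year ∈ d.keys := (PySem.Dict.contains_iff_mem_keys d year).1 hc
      have h0 : pvDmin year d.keys = 0 := by
        have := pvDmin_le year d.keys year hy
        omega
      have ht : pvTarget year d.keys = year := by
        unfold pvTarget
        rw [h0]
        simp [hy]
      rw [ht]
    · rw [if_neg hc]
      have := pvALoop_eq d year hk 0 (by omega)
      simpa using this
  · show averageIfZero budget year l = averageIfZero_alt budget year l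
    unfold averageIfZero averageIfZero_alt
    simp [hb]
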